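-- pv_equiv track=rewrite | github.com/AzRea7/onehaven | onehaven_decision_engine/backend/app/domain/workflow/panes.py | allowed_panes_for_roles
-- ===== SOURCE A (Python) =====
-- from typing import Any, Iterable, Optional
--
-- PANES: list[str] = [
--     "acquisition",
--     "investor",
--     "compliance",
--     "tenants",
--     "management",
--     "admin",
-- ]
--
-- _PANE_META: dict[str, dict[str, Any]] = {
--     "acquisition": {
--         "label": "Acquisition",
--         "description": "Active pursuit of properties that are moving toward purchase or close.",
--         "default_roles": ["admin", "owner", "acquisitions", "analyst"],
--     },
--     "investor": {
--         "label": "Investor",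
--         "description": "Discovery, shortlist, underwriting, and investor-grade property analysis.",
--         "default_roles": ["admin", "owner", "analyst", "viewer"],
--     },
--     "compliance": {
--         "label": "Compliance / S8",
--         "description": "Rehab, jurisdiction readiness, inspections, and voucher compliance workflow.",
--         "default_roles": ["admin", "owner", "compliance", "inspector", "operator"],
--     },
--     "tenants": {
--         "label": "Tenant Placement",
--         "description": "Marketing, screening, matching, leasing, and move-in workflow.",
--         "default_roles": ["admin", "owner", "leasing", "operator", "compliance"],
--     },
--     "management": {
--         "label": "Administration / Management",
--         "description": "Occupied operations, cashflow, maintenance, and property management.",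
--         "default_roles": ["admin", "owner", "manager", "operator", "accounting"],
--     },
--     "admin": {
--         "label": "Admin",
--         "description": "Org-level controls, settings, contracts, permissions, and platform operations.",
--         "default_roles": ["admin", "owner"],
--     },
-- }
--
-- def _normalize_roles(roles: Iterable[str]) -> list[str]:
--     out: list[str] = []
--     seen: set[str] = set()
--     for role in roles:
--         value = str(role or "").strip().lower()
--         if not value or value in seen:
--             continue
--         seen.add(value)
--         out.append(value)
--     return out
--
-- def allowed_panes_for_roles(roles: Iterable[str]) -> list[str]:
--     role_set = set(_normalize_roles(roles))
--     allowed: list[str] = []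
--
--     for pane in PANES:
--         defaults = set(_PANE_META.get(pane, {}).get("default_roles", []))
--         if role_set.intersection(defaults):
--             allowed.append(pane)
--
--     if "admin" in role_set or "owner" in role_set:
--         return list(PANES)
--
--     return allowed or ["investor"]
-- ===== SOURCE B (Python) =====
-- from typing import Any, Iterable
--
-- PANES: list[str] = [
--     "acquisition",
--     "investor",
--     "compliance",
--     "tenants",
--     "management",
--     "admin",
-- ]
--
-- _PANE_META: dict[str, dict[str, Any]] = {
--     "acquisition": {"default_roles": ["admin", "owner", "acquisitions", "analyst"]},
--     "investor": {"default_roles": ["admin", "owner", "analyst", "viewer"]},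
--     "compliance": {"default_roles": ["admin", "owner", "compliance", "inspector", "operator"]},
--     "tenants": {"default_roles": ["admin", "owner", "leasing", "operator", "compliance"]},
--     "management": {"default_roles": ["admin", "owner", "manager", "operator", "accounting"]},
--     "admin": {"default_roles": ["admin", "owner"]},
-- }
--
--
-- def allowed_panes_for_roles(roles: Iterable[str]) -> list[str]:
--     # Invert the metadata once into a role -> panes index, then union the
--     # panes unlocked by each normalized role and emit them in PANES order.
--     pairs = [(role, pane)
--              for pane, meta in _PANE_META.items()
--              for role in meta.get("default_roles", [])]
--     index: dict[str, list[str]] = {}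
--     for role, pane in pairs:
--         index.setdefault(role, []).append(pane)
--
--     norm = {str(r or "").strip().lower() for r in roles}
--     norm.discard("")
--
--     if "admin" in norm or "owner" in norm:
--         return list(PANES)
--
--     unlocked: set[str] = set()
--     for role in norm:
--         unlocked.update(index.get(role, []))
--
--     allowed = [p for p in PANES if p in unlocked]
--     return allowed or ["investor"]
-- ===== Notes on version B (the rewrite author's own statement) =====
-- stated objective: idiomatic
-- what changed: B inverts _PANE_META once into a role->panes index and unions the panes unlocked by each normalized role (emitting them in PANES order), instead of A's per-pane set-intersection scan; the admin/owner shortcut is checked before any pane work.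
import Mathlib
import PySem

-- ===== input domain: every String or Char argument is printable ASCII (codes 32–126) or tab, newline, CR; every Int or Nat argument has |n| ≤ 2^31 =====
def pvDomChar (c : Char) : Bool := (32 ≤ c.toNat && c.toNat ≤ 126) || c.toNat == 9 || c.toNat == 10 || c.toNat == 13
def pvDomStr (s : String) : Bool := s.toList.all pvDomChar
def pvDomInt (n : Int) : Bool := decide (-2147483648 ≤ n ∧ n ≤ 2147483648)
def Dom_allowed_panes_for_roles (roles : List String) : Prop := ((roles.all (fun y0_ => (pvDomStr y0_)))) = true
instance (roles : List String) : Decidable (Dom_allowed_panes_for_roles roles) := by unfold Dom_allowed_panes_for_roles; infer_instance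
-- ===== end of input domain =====

-- B replaces A's per-pane set-intersection scans by a role→panes index inverted
-- from the metadata once, unioning the panes of each normalized role (idiomatic /
-- alternative; same cost at this fixed table size).

-- Module data shared by both programs. Only the "default_roles" field of each
-- _PANE_META entry is consulted by either program; the unused "label" /
-- "description" strings are omitted from the port.
def pvPANES : List String :=
  ["acquisition", "investor", "compliance", "tenants", "management", "admin"]

def pvPaneMeta : PySem.Dict String (List String) :=
  PySem.Dict.ofList
    [("acquisition", ["admin", "owner", "acquisitions", "analyst"]),
     ("investor", ["admin", "owner", "analyst", "viewer"]),
     ("compliance", ["admin", "owner", "compliance", "inspector", "operator"]),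
     ("tenants", ["admin", "owner", "leasing", "operator", "compliance"]),
     ("management", ["admin", "owner", "manager", "operator", "accounting"]),
     ("admin", ["admin", "owner"])]

-- ===== PORT A =====
-- _normalize_roles: the loop over `roles` with its `out` list and `seen` set.
def pvNormLoop : List String → List String → PySem.Set String → List String
  | [], out, _seen => out
  | role :: rest, out, seen =>
    let value := PySem.Str.lower (PySem.Str.strip role)
    if value = "" || PySem.Set.contains seen value then
      pvNormLoop rest out seen
    else
      pvNormLoop rest (out ++ [value]) (PySem.Set.add seen value)

def allowed_panes_for_roles (roles : List String) : List String :=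
  let role_set := PySem.Set.ofList (pvNormLoop roles [] PySem.Set.empty)
  let allowed := pvPANES.foldl (fun acc pane =>
    let defaults := PySem.Set.ofList (pvPaneMeta.getD pane [])
    if PySem.Set.inter role_set defaults ≠ [] then acc ++ [pane] else acc) []
  if PySem.Set.contains role_set "admin" || PySem.Set.contains role_set "owner" then
    pvPANES
  else if allowed = [] then ["investor"] else allowed

-- ===== PORT B =====
-- (role, pane) pairs read off the metadata, then the inverted index.
def pvPairs : List (String × String) :=
  pvPaneMeta.items.flatMap (fun pm => pm.2.map (fun role => (role, pm.1)))

def pvIndex : PySem.Dict String (List String) :=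
  pvPairs.foldl (fun d q => d.modify q.1 [] (fun l => l ++ [q.2])) PySem.Dict.empty

def allowed_panes_for_roles_alt (roles : List String) : List String :=
  let norm := PySem.Set.discard
    (PySem.Set.ofList (roles.map (fun r => PySem.Str.lower (PySem.Str.strip r)))) ""
  if PySem.Set.contains norm "admin" || PySem.Set.contains norm "owner" then
    pvPANES
  else
    let unlocked := norm.foldl
      (fun s role => PySem.Set.update s (pvIndex.getD role [])) PySem.Set.empty
    let allowed := pvPANES.filter (fun p => PySem.Set.contains unlocked p)
    if allowed = [] then ["investor"] else allowed

-- ===== PRECONDITION & SPEC =====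
def Spec_allowed_panes_for_roles (roles : List String) (out : List String) : Prop := out = allowed_panes_for_roles_alt roles
instance (roles : List String) (out : List String) : Decidable (Spec_allowed_panes_for_roles roles out) := by unfold Spec_allowed_panes_for_roles; infer_instance

-- ===== CLAIM (what is proved, stated in full; the proofs are below) =====
def Claim_equal_allowed_panes_for_roles : Prop := ∀ (roles : List String), Dom_allowed_panes_for_roles roles → Spec_allowed_panes_for_roles roles (allowed_panes_for_roles roles)

-- ===== LEMMAS AND PROOFS =====

-- normalization function applied to each role
def pvF (r : String) : String := PySem.Str.lower (PySem.Str.strip r)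

-- membership in A's normalization loop result
lemma pvNormLoop_mem (rest : List String) (out : List String) (seen : PySem.Set String)
    (hinv : ∀ y, y ∈ seen ↔ y ∈ out) (x : String) :
    x ∈ pvNormLoop rest out seen ↔ x ∈ out ∨ (x ≠ "" ∧ ∃ r ∈ rest, pvF r = x) := by
  induction rest generalizing out seen with
  | nil => simp [pvNormLoop]
  | cons role rest ih =>
    simp only [pvNormLoop]
    by_cases h0 : PySem.Str.lower (PySem.Str.strip role) = "" ||
        PySem.Set.contains seen (PySem.Str.lower (PySem.Str.strip role))
    · rw [if_pos h0, ih out seen hinv]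
      simp only [Bool.or_eq_true, decide_eq_true_eq, PySem.Set.contains_iff] at h0
      constructor
      · rintro (hx | hx)
        · exact Or.inl hx
        · exact Or.inr ⟨hx.1, hx.2.elim fun r hr => ⟨r, List.mem_cons_of_mem _ hr.1, hr.2⟩⟩
      · rintro (hx | ⟨hne, r, hr, hfr⟩)
        · exact Or.inl hx
        · rcases List.mem_cons.mp hr with rfl | hr'
          · rcases h0 with h0 | h0
            · exact absurd (show x = "" by rw [← hfr]; simpa [pvF] using h0) hne
            · exact Or.inl (hfr ▸ (hinv _).mp h0)
          · exact Or.inr ⟨hne, r, hr', hfr⟩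
    · rw [if_neg h0]
      simp only [Bool.or_eq_true, decide_eq_true_eq, PySem.Set.contains_iff, not_or] at h0
      rw [ih _ _ (by intro y; simp [PySem.Set.mem_add, hinv y])]
      constructor
      · rintro (hy | hy)
        · rcases List.mem_append.mp hy with hy | hy
          · exact Or.inl hy
          · refine Or.inr ⟨?_, role, List.mem_cons_self, (List.mem_singleton.mp hy).symm⟩
            rw [List.mem_singleton.mp hy]; exact h0.1
        · exact Or.inr ⟨hy.1, hy.2.elim fun r hr => ⟨r, List.mem_cons_of_mem _ hr.1, hr.2⟩⟩
      · rintro (hy | ⟨hne, r, hr, hfr⟩)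
        · exact Or.inl (List.mem_append_left _ hy)
        · rcases List.mem_cons.mp hr with rfl | hr'
          · exact Or.inl (List.mem_append_right _ (by simp [pvF] at hfr; simp [hfr]))
          · exact Or.inr ⟨hne, r, hr', hfr⟩

-- membership in A's role_set
lemma pvA_roleSet_mem (roles : List String) (x : String) :
    x ∈ PySem.Set.ofList (pvNormLoop roles [] PySem.Set.empty) ↔
      x ≠ "" ∧ ∃ r ∈ roles, pvF r = x := by
  rw [PySem.Set.mem_ofList, pvNormLoop_mem roles [] PySem.Set.empty (by simp [PySem.Set.empty])]
  simp

-- membership in B's norm set: same characterization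
lemma pvB_norm_mem (roles : List String) (x : String) :
    x ∈ PySem.Set.discard
      (PySem.Set.ofList (roles.map (fun r => PySem.Str.lower (PySem.Str.strip r)))) "" ↔
      x ≠ "" ∧ ∃ r ∈ roles, pvF r = x := by
  rw [PySem.Set.mem_discard]
  simp [PySem.Set.mem_ofList, pvF, and_comm]

-- membership in B's unlocked set
lemma pvUnlocked_mem (l : List String) (s : PySem.Set String) (y : String) :
    y ∈ l.foldl (fun s role => PySem.Set.update s (pvIndex.getD role [])) s ↔
      y ∈ s ∨ ∃ r ∈ l, y ∈ pvIndex.getD r [] := by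
  induction l generalizing s with
  | nil => simp
  | cons r l ih =>
    simp only [List.foldl_cons, ih, PySem.Set.mem_update, List.mem_cons]
    constructor
    · rintro ((h | h) | ⟨r', hr', h⟩)
      · exact Or.inl h
      · exact Or.inr ⟨r, Or.inl rfl, h⟩
      · exact Or.inr ⟨r', Or.inr hr', h⟩
    · rintro (h | ⟨r', (rfl | hr'), h⟩)
      · exact Or.inl (Or.inl h)
      · exact Or.inl (Or.inr h)
      · exact Or.inr ⟨r', hr', h⟩

-- the index inverts the pair list
lemma pvIndex_mem (r p : String) :
    p ∈ pvIndex.getD r [] ↔ (r, p) ∈ pvPairs := by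
  rw [pvIndex, PySem.Dict.getD_foldl_modify_append]
  simp only [PySem.Dict.getD_empty, List.nil_append, List.mem_map, List.mem_filter,
    beq_iff_eq]
  constructor
  · rintro ⟨⟨r', p'⟩, ⟨hmem, rfl⟩, rfl⟩; exact hmem
  · intro h; exact ⟨(r, p), ⟨h, rfl⟩, rfl⟩

-- per pane: A's defaults lookup agrees with the pair list
set_option maxHeartbeats 1000000 in
lemma pvPairs_eq : pvPairs =
    [("admin", "acquisition"), ("owner", "acquisition"), ("acquisitions", "acquisition"),
     ("analyst", "acquisition"), ("admin", "investor"), ("owner", "investor"),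
     ("analyst", "investor"), ("viewer", "investor"), ("admin", "compliance"),
     ("owner", "compliance"), ("compliance", "compliance"), ("inspector", "compliance"),
     ("operator", "compliance"), ("admin", "tenants"), ("owner", "tenants"),
     ("leasing", "tenants"), ("operator", "tenants"), ("compliance", "tenants"),
     ("admin", "management"), ("owner", "management"), ("manager", "management"),
     ("operator", "management"), ("accounting", "management"), ("admin", "admin"),
     ("owner", "admin")] := by decide

set_option maxHeartbeats 1000000 in
lemma pvDefaults_pairs (p : String) (hp : p ∈ pvPANES) (x : String) :
    x ∈ pvPaneMeta.getD p [] ↔ (x, p) ∈ pvPairs := by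
  have g1 : pvPaneMeta.getD "acquisition" [] = ["admin", "owner", "acquisitions", "analyst"] := by decide
  have g2 : pvPaneMeta.getD "investor" [] = ["admin", "owner", "analyst", "viewer"] := by decide
  have g3 : pvPaneMeta.getD "compliance" [] = ["admin", "owner", "compliance", "inspector", "operator"] := by decide
  have g4 : pvPaneMeta.getD "tenants" [] = ["admin", "owner", "leasing", "operator", "compliance"] := by decide
  have g5 : pvPaneMeta.getD "management" [] = ["admin", "owner", "manager", "operator", "accounting"] := by decide
  have g6 : pvPaneMeta.getD "admin" [] = ["admin", "owner"] := by decide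
  simp only [pvPANES, List.mem_cons, List.not_mem_nil, or_false] at hp
  rcases hp with rfl | rfl | rfl | rfl | rfl | rfl
  · rw [pvPairs_eq, g1]; simp [Prod.mk.injEq]
  · rw [pvPairs_eq, g2]; simp [Prod.mk.injEq]
  · rw [pvPairs_eq, g3]; simp [Prod.mk.injEq]
  · rw [pvPairs_eq, g4]; simp [Prod.mk.injEq]
  · rw [pvPairs_eq, g5]; simp [Prod.mk.injEq]
  · rw [pvPairs_eq, g6]; simp [Prod.mk.injEq]

-- ===== VERDICT (by name: the statement is the Claim_ definition above) =====
theorem allowed_panes_for_roles_spec : Claim_equal_allowed_panes_for_roles := by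
  intro roles _hdom
  unfold Spec_allowed_panes_for_roles allowed_panes_for_roles allowed_panes_for_roles_alt
  simp only []
  have hmem : ∀ x, x ∈ PySem.Set.ofList (pvNormLoop roles [] PySem.Set.empty) ↔
      x ∈ PySem.Set.discard
        (PySem.Set.ofList (roles.map (fun r => PySem.Str.lower (PySem.Str.strip r)))) "" := by
    intro x; rw [pvA_roleSet_mem, pvB_norm_mem]
  have hcontains : ∀ x, PySem.Set.contains (PySem.Set.ofList (pvNormLoop roles [] PySem.Set.empty)) x =
      PySem.Set.contains (PySem.Set.discard
        (PySem.Set.ofList (roles.map (fun r => PySem.Str.lower (PySem.Str.strip r)))) "") x := by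
    intro x
    rw [Bool.eq_iff_iff, PySem.Set.contains_iff, PySem.Set.contains_iff]
    exact hmem x
  rw [hcontains "admin", hcontains "owner"]
  have hL : pvPANES.foldl (fun acc pane =>
      if PySem.Set.inter (PySem.Set.ofList (pvNormLoop roles [] PySem.Set.empty))
          (PySem.Set.ofList (pvPaneMeta.getD pane [])) ≠ [] then acc ++ [pane] else acc) [] =
      pvPANES.filter (fun p => PySem.Set.contains
        ((PySem.Set.discard (PySem.Set.ofList
            (roles.map (fun r => PySem.Str.lower (PySem.Str.strip r)))) "").foldl
          (fun s role => PySem.Set.update s (pvIndex.getD role [])) PySem.Set.empty) p) := by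
    rw [PySem.List.foldl_append_ite_eq_filter, List.nil_append]
    refine List.filter_congr ?_
    intro pane hpane
    rw [Bool.eq_iff_iff, decide_eq_true_eq, PySem.Set.contains_iff, pvUnlocked_mem]
    rw [Ne, List.eq_nil_iff_forall_not_mem]
    push Not
    constructor
    · rintro ⟨x, hx⟩
      rw [PySem.Set.mem_inter] at hx
      obtain ⟨hx1, hx2⟩ := hx
      rw [PySem.Set.mem_ofList] at hx2
      exact Or.inr ⟨x, (hmem x).mp hx1, (pvIndex_mem x pane).mpr
        ((pvDefaults_pairs pane hpane x).mp hx2)⟩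
    · rintro (h | ⟨r, hr, hp⟩)
      · exact absurd h (by simp [PySem.Set.empty])
      · refine ⟨r, ?_⟩
        rw [PySem.Set.mem_inter]
        refine ⟨(hmem r).mpr hr, ?_⟩
        rw [PySem.Set.mem_ofList]
        exact (pvDefaults_pairs pane hpane r).mpr ((pvIndex_mem r pane).mp hp)
  rw [hL]
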